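-- pv_equiv track=rewrite | github.com/dkoutavas/drumgen | assembler.py | _resolve_layer_conflicts
-- ===== SOURCE A (Python) =====
-- _CYMBAL_PRIORITY = {"crash_1": 3, "crash_2": 3, "china": 3, "splash": 2,
--                     "ride": 1, "ride_bell": 1, "hihat_closed": 0, "hihat_open": 0, "hihat_pedal": 0}
--
-- _STICK_PRIORITY = {"snare": 2, "snare_rim": 2, "snare_ghost": 1,
--                    "tom_high": 0, "tom_mid": 0, "tom_low": 0, "tom_floor": 0}
--
-- _VEL_RANK = {"accent": 3, "normal": 2, "soft": 1, "ghost": 0}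
--
-- def _resolve_layer_conflicts(merged_hits):
--     """Resolve conflicts in merged layer hits.
--
--     At each (bar, beat, sub): cymbal priority, stick priority, keep higher velocity
--     for same instrument.
--     """
--     from collections import defaultdict
--
--     positions = defaultdict(list)
--     for hit in merged_hits:
--         bar, beat, sub, inst, vel = hit
--         positions[(bar, beat, sub)].append(hit)
--
--     filtered = []
--     for pos, hits in positions.items():
--         # Group by instrument — keep highest velocity per instrument
--         by_inst = defaultdict(list)
--         for h in hits:
--             by_inst[h[3]].append(h)
--
--         deduped = []
--         for inst, inst_hits in by_inst.items():
--             if len(inst_hits) > 1: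
--                 best = max(inst_hits, key=lambda h: _VEL_RANK.get(h[4], 0))
--                 deduped.append(best)
--             else:
--                 deduped.append(inst_hits[0])
--
--         # Now apply physical constraints
--         cymbals = [(h, _CYMBAL_PRIORITY.get(h[3], -1)) for h in deduped if h[3] in _CYMBAL_PRIORITY]
--         sticks = [(h, _STICK_PRIORITY.get(h[3], -1)) for h in deduped if h[3] in _STICK_PRIORITY]
--         feet = [h for h in deduped if h[3] == "kick" or h[3] == "hihat_pedal"]
--
--         if cymbals:
--             best_prio = max(p for _, p in cymbals)
--             best = [h for h, p in cymbals if p == best_prio]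
--             filtered.append(best[0])
--         if sticks:
--             best_prio = max(p for _, p in sticks)
--             best = [h for h, p in sticks if p == best_prio]
--             filtered.append(best[0])
--         filtered.extend(feet)
--
--     return filtered
-- ===== SOURCE B (Python) =====
-- _CYMBAL_PRIORITY = {"crash_1": 3, "crash_2": 3, "china": 3, "splash": 2,
--                     "ride": 1, "ride_bell": 1, "hihat_closed": 0, "hihat_open": 0, "hihat_pedal": 0}
--
-- _STICK_PRIORITY = {"snare": 2, "snare_rim": 2, "snare_ghost": 1,
--                    "tom_high": 0, "tom_mid": 0, "tom_low": 0, "tom_floor": 0}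
--
-- _VEL_RANK = {"accent": 3, "normal": 2, "soft": 1, "ghost": 0}
--
--
-- def _resolve_layer_conflicts(merged_hits):
--     """Streaming rewrite: one composite-key table dedups velocities, one pass
--     over it selects cymbal/stick/feet per position."""
--     # Pass 1: best hit per (position, instrument), first among velocity ties wins.
--     table = {}
--     for hit in merged_hits:
--         bar, beat, sub, inst, vel = hit
--         k = (bar, beat, sub, inst)
--         cur = table.get(k)
--         table[k] = hit if (cur is None or _VEL_RANK.get(vel, 0) > _VEL_RANK.get(cur[4], 0)) else cur
--
--     # Pass 2: per position (first-appearance order) keep the winning cymbal,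
--     # the winning stick, and every foot hit.
--     best = {}
--     for (bar, beat, sub, inst), hit in table.items():
--         cym, stick, feet = best.get((bar, beat, sub), (None, None, []))
--         if inst in _CYMBAL_PRIORITY and (
--                 cym is None or _CYMBAL_PRIORITY[inst] > _CYMBAL_PRIORITY[cym[3]]):
--             cym = hit
--         if inst in _STICK_PRIORITY and (
--                 stick is None or _STICK_PRIORITY[inst] > _STICK_PRIORITY[stick[3]]):
--             stick = hit
--         if inst == "kick" or inst == "hihat_pedal":
--             feet = feet + [hit]
--         best[(bar, beat, sub)] = (cym, stick, feet)
--
--     out = []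
--     for cym, stick, feet in best.values():
--         if cym is not None:
--             out.append(cym)
--         if stick is not None:
--             out.append(stick)
--         out.extend(feet)
--     return out
-- ===== Notes on version B (the rewrite author's own statement) =====
-- stated objective: alternative
-- what changed: Replaces A's nested position->list grouping plus per-position instrument regrouping and max()/filter selection passes by one streaming composite-key (position,instrument) best-hit table and a single selection pass over it that keeps the winning cymbal, winning stick and foot hits per position.
import Mathlib
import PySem

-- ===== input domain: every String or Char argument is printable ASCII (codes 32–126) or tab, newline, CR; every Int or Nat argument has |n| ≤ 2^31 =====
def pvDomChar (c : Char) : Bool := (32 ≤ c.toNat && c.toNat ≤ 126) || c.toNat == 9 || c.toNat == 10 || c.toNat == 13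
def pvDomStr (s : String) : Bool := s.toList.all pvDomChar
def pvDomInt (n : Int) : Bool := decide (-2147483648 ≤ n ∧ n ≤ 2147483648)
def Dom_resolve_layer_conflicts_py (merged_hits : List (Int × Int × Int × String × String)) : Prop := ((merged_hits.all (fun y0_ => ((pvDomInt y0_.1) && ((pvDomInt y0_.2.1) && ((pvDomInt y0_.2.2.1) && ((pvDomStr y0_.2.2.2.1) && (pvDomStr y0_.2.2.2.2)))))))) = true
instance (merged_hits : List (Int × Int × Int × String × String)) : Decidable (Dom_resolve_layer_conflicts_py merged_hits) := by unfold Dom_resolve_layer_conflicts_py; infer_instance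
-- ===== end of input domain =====

-- B replaces A's nested position→instrument grouping by one composite-key table plus one
-- streaming selection pass per table entry (objective: alternative decomposition, same result).

-- ===== PORT A =====
-- module-level constants shared by both implementations
def pvCYMBAL : PySem.Dict String Int := PySem.Dict.ofList
  [("crash_1",3),("crash_2",3),("china",3),("splash",2),("ride",1),("ride_bell",1),
   ("hihat_closed",0),("hihat_open",0),("hihat_pedal",0)]
def pvSTICK : PySem.Dict String Int := PySem.Dict.ofList
  [("snare",2),("snare_rim",2),("snare_ghost",1),
   ("tom_high",0),("tom_mid",0),("tom_low",0),("tom_floor",0)]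
def pvVEL : PySem.Dict String Int := PySem.Dict.ofList
  [("accent",3),("normal",2),("soft",1),("ghost",0)]

-- tuple destructuring helpers (hit = (bar, beat, sub, inst, vel))
def pvPos (h : Int × Int × Int × String × String) : Int × Int × Int := (h.1, h.2.1, h.2.2.1)
def pvInst (h : Int × Int × Int × String × String) : String := h.2.2.2.1
-- _VEL_RANK.get(h[4], 0)
def pvRank (h : Int × Int × Int × String × String) : Int := pvVEL.getD h.2.2.2.2 0
def pvDflt : Int × Int × Int × String × String := (0, 0, 0, "", "")

def resolve_layer_conflicts_py (merged_hits : List (Int × Int × Int × String × String)) : List (Int × Int × Int × String × String) :=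
  -- positions = defaultdict(list); positions[(bar,beat,sub)].append(hit)
  let positions := merged_hits.foldl
    (fun d h => d.modify (pvPos h) [] (fun x => x ++ [h])) PySem.Dict.empty
  -- for pos, hits in positions.items():
  positions.items.foldl (fun filtered pr =>
    let hits := pr.2
    -- by_inst = defaultdict(list); by_inst[h[3]].append(h)
    let by_inst := hits.foldl
      (fun d h => d.modify (pvInst h) [] (fun x => x ++ [h])) PySem.Dict.empty
    -- deduped: per instrument keep max by _VEL_RANK (first wins on ties)
    let deduped := by_inst.items.foldl (fun acc ip =>
      if ip.2.length > 1 then acc ++ [PySem.List.maxD ip.2 pvRank pvDflt]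
      else acc ++ [PySem.List.pyGetD ip.2 0 pvDflt]) []
    let cymbals := (deduped.filter (fun h => pvCYMBAL.contains (pvInst h))).map
      (fun h => (h, pvCYMBAL.getD (pvInst h) (-1)))
    let sticks := (deduped.filter (fun h => pvSTICK.contains (pvInst h))).map
      (fun h => (h, pvSTICK.getD (pvInst h) (-1)))
    let feet := deduped.filter (fun h => pvInst h == "kick" || pvInst h == "hihat_pedal")
    let filtered := if cymbals.isEmpty then filtered else
      let best_prio := PySem.List.maxD (cymbals.map (fun x => x.2)) (fun p => p) 0
      let best := (cymbals.filter (fun x => x.2 == best_prio)).map (fun x => x.1)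
      filtered ++ [PySem.List.pyGetD best 0 pvDflt]
    let filtered := if sticks.isEmpty then filtered else
      let best_prio := PySem.List.maxD (sticks.map (fun x => x.2)) (fun p => p) 0
      let best := (sticks.filter (fun x => x.2 == best_prio)).map (fun x => x.1)
      filtered ++ [PySem.List.pyGetD best 0 pvDflt]
    filtered ++ feet) []

-- ===== PORT B =====
def resolve_layer_conflicts_py_alt (merged_hits : List (Int × Int × Int × String × String)) : List (Int × Int × Int × String × String) :=
  -- pass 1: best hit per (position, instrument); first among velocity ties wins
  let table := merged_hits.foldl (fun t h =>
    let k := (pvPos h, pvInst h)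
    t.insert k (match t.get? k with
      | none => h
      | some c => if pvRank h > pvRank c then h else c)) PySem.Dict.empty
  -- pass 2: per position keep winning cymbal, winning stick, every foot hit
  let best := table.items.foldl (fun m pr =>
    let p := pr.1.1
    let inst := pr.1.2
    let hit := pr.2
    let st := m.getD p (none, none, ([] : List (Int × Int × Int × String × String)))
    let cym := if pvCYMBAL.contains inst &&
        -- 'cym is None or _CYMBAL_PRIORITY[inst] > _CYMBAL_PRIORITY[cym[3]]' (short-circuit or)
        (st.1.elim true (fun c => decide (pvCYMBAL.getD (pvInst c) 0 < pvCYMBAL.getD inst 0)))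
      then some hit else st.1
    let stick := if pvSTICK.contains inst &&
        (st.2.1.elim true (fun c => decide (pvSTICK.getD (pvInst c) 0 < pvSTICK.getD inst 0)))
      then some hit else st.2.1
    let feet := if inst == "kick" || inst == "hihat_pedal" then st.2.2 ++ [hit] else st.2.2
    m.insert p (cym, stick, feet)) PySem.Dict.empty
  -- emit: cymbal, stick, feet per position
  best.values.foldl (fun out st =>
    let out := match st.1 with
      | some c => out ++ [c]
      | none => out
    let out := match st.2.1 with
      | some s => out ++ [s]
      | none => out
    out ++ st.2.2) []

-- ===== PRECONDITION & SPEC =====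
def Spec_resolve_layer_conflicts_py (merged_hits : List (Int × Int × Int × String × String)) (out : List (Int × Int × Int × String × String)) : Prop := out = resolve_layer_conflicts_py_alt merged_hits
instance (merged_hits : List (Int × Int × Int × String × String)) (out : List (Int × Int × Int × String × String)) : Decidable (Spec_resolve_layer_conflicts_py merged_hits out) := by unfold Spec_resolve_layer_conflicts_py; infer_instance

-- ===== CLAIM (what is proved, stated in full; the proofs are below) =====
def Claim_equal_resolve_layer_conflicts_py : Prop := ∀ (merged_hits : List (Int × Int × Int × String × String)), Dom_resolve_layer_conflicts_py merged_hits → Spec_resolve_layer_conflicts_py merged_hits (resolve_layer_conflicts_py merged_hits)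

-- ===== LEMMAS AND PROOFS =====


-- generic: value of an insert-update fold at a key = fold over the matching sublist
theorem pv_get?_foldl_insertUpd {κ ν α : Type} [BEq κ] [LawfulBEq κ] [DecidableEq κ]
    (l : List α) (key : α → κ) (g : Option ν → α → ν) (t : PySem.Dict κ ν) (p : κ) :
    (l.foldl (fun t x => t.insert (key x) (g (t.get? (key x)) x)) t).get? p
      = (l.filter (fun x => key x == p)).foldl (fun o x => some (g o x)) (t.get? p) := by
  induction l generalizing t with
  | nil => rfl
  | cons x xs ih =>
    simp only [List.foldl_cons, List.filter_cons, ih, PySem.Dict.get?_insert]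
    by_cases hx : key x = p
    · subst hx; simp
    · rw [if_neg (fun h : p = key x => hx h.symm), if_neg (by simp [hx])]

theorem pv_getD_foldl_insertUpd {κ σ α : Type} [BEq κ] [LawfulBEq κ] [DecidableEq κ]
    (l : List α) (key : α → κ) (f : σ → α → σ) (d0 : σ) (m : PySem.Dict κ σ) (p : κ) :
    (l.foldl (fun m x => m.insert (key x) (f (m.getD (key x) d0) x)) m).getD p d0
      = (l.filter (fun x => key x == p)).foldl f (m.getD p d0) := by
  induction l generalizing m with
  | nil => rfl
  | cons x xs ih =>
    simp only [List.foldl_cons, List.filter_cons, ih, PySem.Dict.getD_insert]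
    by_cases hx : key x = p
    · subst hx; simp
    · rw [if_neg (fun h : p = key x => hx h.symm), if_neg (by simp [hx])]

-- dedup commutes with mapping and filtering
theorem pv_ofList_map_ofList {α β : Type} [BEq α] [LawfulBEq α] [BEq β] [LawfulBEq β]
    (f : α → β) (xs : List α) :
    PySem.Set.ofList ((PySem.Set.ofList xs).map f) = PySem.Set.ofList (xs.map f) := by
  induction xs using List.reverseRecOn with
  | nil => rfl
  | append_singleton xs x ih =>
    rw [List.map_append]
    simp only [List.map_singleton]
    rw [PySem.Set.ofList_append_singleton, PySem.Set.ofList_append_singleton]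
    by_cases hx : x ∈ PySem.Set.ofList xs
    · rw [PySem.Set.add_of_mem hx, ih, PySem.Set.add_of_mem]
      have : f x ∈ xs.map f := List.mem_map_of_mem ((PySem.Set.mem_ofList _ _).1 hx)
      exact (PySem.Set.mem_ofList _ _).2 this
    · rw [PySem.Set.add_of_not_mem hx, List.map_append]
      simp only [List.map_singleton]
      rw [PySem.Set.ofList_append_singleton, ih]

theorem pv_filter_ofList {α : Type} [BEq α] [LawfulBEq α] (q : α → Bool) (xs : List α) :
    (PySem.Set.ofList xs).filter q = PySem.Set.ofList (xs.filter q) := by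
  induction xs using List.reverseRecOn with
  | nil => rfl
  | append_singleton xs x ih =>
    rw [PySem.Set.ofList_append_singleton, List.filter_append, PySem.Set.add_eq_ite]
    by_cases hq : q x = true
    · rw [(by simp [hq] : List.filter q [x] = [x]), PySem.Set.ofList_append_singleton,
        PySem.Set.add_eq_ite]
      by_cases hx : x ∈ PySem.Set.ofList xs
      · rw [if_pos hx, ih, if_pos]
        rw [PySem.Set.mem_ofList] at hx ⊢
        exact List.mem_filter.2 ⟨hx, hq⟩
      · rw [if_neg hx, List.filter_append, (by simp [hq] : List.filter q [x] = [x]), ih, if_neg]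
        rw [PySem.Set.mem_ofList] at hx ⊢
        exact fun hmem => hx (List.mem_filter.1 hmem).1
    · rw [(by simp [hq] : List.filter q [x] = []), List.append_nil]
      by_cases hx : x ∈ PySem.Set.ofList xs
      · rw [if_pos hx, ih]
      · rw [if_neg hx, List.filter_append, (by simp [hq] : List.filter q [x] = []),
          List.append_nil, ih]

theorem pv_ofList_map_inj {α β : Type} [BEq α] [LawfulBEq α] [BEq β] [LawfulBEq β]
    (g : α → β) (hg : Function.Injective g) (xs : List α) :
    PySem.Set.ofList (xs.map g) = (PySem.Set.ofList xs).map g := by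
  induction xs using List.reverseRecOn with
  | nil => rfl
  | append_singleton xs x ih =>
    rw [List.map_append]
    simp only [List.map_singleton]
    rw [PySem.Set.ofList_append_singleton, PySem.Set.ofList_append_singleton, ih,
      PySem.Set.add_eq_ite, PySem.Set.add_eq_ite]
    by_cases hx : x ∈ PySem.Set.ofList xs
    · rw [if_pos hx, if_pos (List.mem_map_of_mem hx)]
    · rw [if_neg hx, if_neg (by
        intro hmem
        rcases List.mem_map.1 hmem with ⟨y, hy, hgy⟩
        exact hx (hg hgy ▸ hy)), List.map_append]
      simp only [List.map_singleton]

-- max? from a some-accumulator is a plain running first-argmax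
theorem pv_max?_foldl_some {α : Type} (w : α → Int) (ys : List α) (a : α) :
    List.foldl (fun acc x => match acc with
      | none => some x
      | some m => if w m < w x then some x else some m) (some a) ys
      = some (ys.foldl (fun m x => if w m < w x then x else m) a) := by
  induction ys generalizing a with
  | nil => rfl
  | cons y ys ih =>
    simp only [List.foldl_cons]
    by_cases h : w a < w y <;> simp only [h, if_pos, if_neg, ite_true, ite_false] <;> rw [ih]

theorem pv_max?_cons {α : Type} (w : α → Int) (y : α) (ys : List α) :
    PySem.List.max? (y :: ys) w
      = some (ys.foldl (fun m x => if w m < w x then x else m) y) := by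
  show List.foldl _ (some y) ys = _
  exact pv_max?_foldl_some w ys y

-- the running first-argmax is the first element attaining the running max of the key
theorem pv_argmax_filter {α : Type} (w : α → Int) (dflt : α) (ys : List α) (y : α) :
    ys.foldl (fun m x => if w m < w x then x else m) y
      = ((y :: ys).filter
          (fun h => w h == ys.foldl (fun m v => max m (w v)) (w y))).getD 0 dflt := by
  induction ys generalizing y with
  | nil => simp
  | cons z zs ih =>
    simp only [List.foldl_cons]
    have hbound := PySem.List.le_foldl_max_int zs w (max (w y) (w z))
    set M := zs.foldl (fun m v => max m (w v)) (max (w y) (w z)) with hMdef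
    by_cases h : w y < w z
    · rw [if_pos h, ih z]
      have hM2 : zs.foldl (fun m v => max m (w v)) (w z) = M := by
        rw [hMdef]; congr 1; omega
      rw [hM2]
      have hy : (w y == M) = false := by
        simp only [beq_eq_false_iff_ne, ne_eq]
        have : w z ≤ M := le_trans (le_max_right _ _) hbound.1
        omega
      simp only [List.filter_cons, hy, Bool.false_eq_true, if_false]
    · rw [if_neg h, ih y]
      have hM2 : zs.foldl (fun m v => max m (w v)) (w y) = M := by
        rw [hMdef]; congr 1; omega
      rw [hM2]
      by_cases hy : w y = M
      · simp only [List.filter_cons, (by simp [hy] : (w y == M) = true), if_true,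
          List.getD_cons_zero]
      · have hyle : w y ≤ M := le_trans (le_max_left _ _) hbound.1
        have hzle : w z ≤ M := le_trans (le_max_right _ _) hbound.1
        have hz : (w z == M) = false := by
          simp only [beq_eq_false_iff_ne, ne_eq]; omega
        simp only [List.filter_cons, (by simp [hy] : (w y == M) = false), hz,
          Bool.false_eq_true, if_false]

-- A's "max over priorities, then first with that priority" IS max?
theorem pv_coreMax {α : Type} (w : α → Int) (dflt : α) (D : List α) :
    (PySem.List.max? D w).toList
      = if D.isEmpty then ([] : List α)
        else [PySem.List.pyGetD
          (D.filter (fun h => w h == PySem.List.maxD (D.map w) (fun p => p) 0)) 0 dflt] := by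
  cases D with
  | nil => rfl
  | cons y ys =>
    simp only [List.isEmpty_cons, Bool.false_eq_true, if_false, List.map_cons]
    rw [pv_max?_cons, PySem.List.maxD, PySem.List.max?_id_cons, Option.getD_some,
      List.foldl_map, pv_argmax_filter w dflt]
    rw [PySem.List.pyGetD_zero]
    rfl

theorem pv_max?_congr_aux {α : Type} (w1 w2 : α → Int) :
    ∀ (D : List α) (c : Option α), (∀ x ∈ D, w1 x = w2 x) →
      (∀ m, c = some m → w1 m = w2 m) →
      D.foldl (fun acc x => match acc with
        | none => some x
        | some m => if w1 m < w1 x then some x else some m) c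
      = D.foldl (fun acc x => match acc with
        | none => some x
        | some m => if w2 m < w2 x then some x else some m) c := by
  intro D
  induction D with
  | nil => intro c _ _; rfl
  | cons y ys ih =>
    intro c hD hc
    simp only [List.foldl_cons]
    have hy : w1 y = w2 y := hD y (by simp)
    have hD' : ∀ x ∈ ys, w1 x = w2 x := fun x hx => hD x (by simp [hx])
    cases c with
    | none => exact ih (some y) hD' (by intro m hm; cases hm; exact hy)
    | some m =>
      have hm : w1 m = w2 m := hc m rfl
      by_cases h : w2 m < w2 y
      · rw [(by simp [hy, hm, h] : (match some m with
            | none => some y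
            | some m' => if w1 m' < w1 y then some y else some m') = some y),
          (by simp [h] : (match some m with
            | none => some y
            | some m' => if w2 m' < w2 y then some y else some m') = some y)]
        exact ih (some y) hD' (by intro m' hm'; cases hm'; exact hy)
      · rw [(by simp [hy, hm, h] : (match some m with
            | none => some y
            | some m' => if w1 m' < w1 y then some y else some m') = some m),
          (by simp [h] : (match some m with
            | none => some y
            | some m' => if w2 m' < w2 y then some y else some m') = some m)]
        exact ih (some m) hD' (by intro m' hm'; cases hm'; exact hm)

-- max? only depends on key values on the list
theorem pv_max?_congr {α : Type} (w1 w2 : α → Int) (D : List α)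
    (h : ∀ x ∈ D, w1 x = w2 x) : PySem.List.max? D w1 = PySem.List.max? D w2 := by
  show List.foldl _ none D = List.foldl _ none D
  exact pv_max?_congr_aux w1 w2 D none h (by intro m hm; cases hm)

-- a guarded streaming selection is max? of the filtered list
theorem pv_selFold {α : Type} (P : α → Bool) (w : α → Int) (D : List α) (c : Option α) :
    D.foldl (fun c h => if P h && (c.elim true (fun c' => decide (w c' < w h)))
      then some h else c) c
      = (D.filter P).foldl (fun acc x => match acc with
        | none => some x
        | some m => if w m < w x then some x else some m) c := by
  induction D generalizing c with
  | nil => rfl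
  | cons y ys ih =>
    simp only [List.foldl_cons, List.filter_cons]
    cases c with
    | none =>
      by_cases hp : P y = true
      · simp only [hp, Option.elim_none, Bool.and_true, reduceIte, List.foldl_cons]
        exact ih (some y)
      · simp only [hp, Option.elim_none, Bool.and_true, Bool.false_eq_true, reduceIte]
        exact ih none
    | some m =>
      by_cases hp : P y = true
      · by_cases h : w m < w y
        · simp only [hp, Option.elim_some, Bool.true_and, decide_eq_true_eq, h, reduceIte,
            List.foldl_cons]
          exact ih (some y)
        · simp only [hp, Option.elim_some, Bool.true_and, decide_eq_true_eq, h, reduceIte,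
            List.foldl_cons]
          exact ih (some m)
      · simp only [hp, Bool.false_and, Bool.false_eq_true, reduceIte]
        exact ih (some m)

-- characterization of the defaultdict(list)-append grouping loop
theorem pv_groupD_items {κ α : Type} [BEq κ] [LawfulBEq κ] (key : α → κ) (l : List α) :
    (l.foldl (fun d h => d.modify (key h) [] (fun x => x ++ [h])) PySem.Dict.empty).items
      = (PySem.Set.ofList (l.map key)).map
          (fun k => (k, l.filter (fun h => key h == k))) := by
  have hkeys : (l.foldl (fun d h => d.modify (key h) [] (fun x => x ++ [h]))
      PySem.Dict.empty).keys = PySem.Set.ofList (l.map key) := by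
    rw [PySem.Dict.keys_foldl_modify_key l key [] (fun _ h x => x ++ [h]),
      PySem.Dict.keys_empty, PySem.Set.update_nil_left]
  have hnodup : (l.foldl (fun d h => d.modify (key h) [] (fun x => x ++ [h]))
      PySem.Dict.empty).keys.Nodup := by
    rw [hkeys]; exact PySem.Set.nodup_ofList _
  rw [PySem.Dict.items_eq_map_keys _ hnodup ([] : List α), hkeys]
  apply List.map_congr_left
  intro k _
  have hfold : l.foldl (fun d h => d.modify (key h) [] (fun x => x ++ [h])) PySem.Dict.empty
      = (l.map (fun h => (key h, h))).foldl
          (fun d p => d.modify p.1 [] (fun x => x ++ [p.2])) PySem.Dict.empty := by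
    rw [List.foldl_map]
  rw [hfold, PySem.Dict.getD_foldl_modify_append, List.filter_map, List.map_map]
  simp only [Function.comp_def]
  simp

-- A's per-instrument dedup entry is the first velocity argmax
theorem pv_entry_eq (xs : List (Int × Int × Int × String × String)) (hne : xs ≠ []) :
    (if xs.length > 1 then PySem.List.maxD xs pvRank pvDflt
     else PySem.List.pyGetD xs 0 pvDflt)
      = (PySem.List.max? xs pvRank).getD pvDflt := by
  match xs with
  | [y] =>
    rw [if_neg (by simp)]
    rw [PySem.List.pyGetD_zero]
    rfl
  | y :: z :: zs =>
    rw [if_pos (by simp)]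
    rfl

-- canonical per-position data
def pvGroup (l : List (Int × Int × Int × String × String)) (p : Int × Int × Int) :
    List (Int × Int × Int × String × String) := l.filter (fun h => pvPos h == p)
def pvIHits (l : List (Int × Int × Int × String × String)) (p : Int × Int × Int) (i : String) :
    List (Int × Int × Int × String × String) := (pvGroup l p).filter (fun h => pvInst h == i)
def pvInsts (l : List (Int × Int × Int × String × String)) (p : Int × Int × Int) : List String :=
  PySem.Set.ofList ((pvGroup l p).map pvInst)
def pvBest (l : List (Int × Int × Int × String × String)) (p : Int × Int × Int) (i : String) :
    Int × Int × Int × String × String :=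
  (PySem.List.max? (pvIHits l p i) pvRank).getD pvDflt
def pvDeduped (l : List (Int × Int × Int × String × String)) (p : Int × Int × Int) :
    List (Int × Int × Int × String × String) := (pvInsts l p).map (pvBest l p)
def pvOutPos (l : List (Int × Int × Int × String × String)) (p : Int × Int × Int) :
    List (Int × Int × Int × String × String) :=
  (PySem.List.max? ((pvDeduped l p).filter (fun h => pvCYMBAL.contains (pvInst h)))
      (fun h => pvCYMBAL.getD (pvInst h) (-1))).toList
  ++ (PySem.List.max? ((pvDeduped l p).filter (fun h => pvSTICK.contains (pvInst h)))
      (fun h => pvSTICK.getD (pvInst h) (-1))).toList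
  ++ (pvDeduped l p).filter (fun h => pvInst h == "kick" || pvInst h == "hihat_pedal")

-- a two-branch appending loop is a map
theorem pv_foldl_append_if2 {α β : Type} (q : α → Prop) [DecidablePred q] (f g : α → β) (xs : List α)
    (acc : List β) :
    xs.foldl (fun acc x => if q x then acc ++ [f x] else acc ++ [g x]) acc
      = acc ++ xs.map (fun x => if q x then f x else g x) := by
  have h : (fun (acc : List β) x => if q x then acc ++ [f x] else acc ++ [g x])
      = (fun acc x => acc ++ [if q x then f x else g x]) := by
    funext acc x; split_ifs <;> rfl
  rw [h, PySem.List.foldl_append_singleton_eq_map]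

-- A's "collect pairs, max priority, first with it" block is max? of the filtered list
theorem pv_pieceA (w : (Int × Int × Int × String × String) → Int)
    (P : (Int × Int × Int × String × String) → Bool)
    (D : List (Int × Int × Int × String × String)) :
    (if ((D.filter P).map (fun h => (h, w h))).isEmpty then
      ([] : List (Int × Int × Int × String × String))
     else
      [PySem.List.pyGetD
        ((((D.filter P).map (fun h => (h, w h))).filter
            (fun x => x.2 == PySem.List.maxD
              (((D.filter P).map (fun h => (h, w h))).map (fun x => x.2)) (fun p => p) 0)).map
          (fun x => x.1)) 0 pvDflt])
      = (PySem.List.max? (D.filter P) w).toList := by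
  rw [pv_coreMax w pvDflt (D.filter P)]
  simp only [List.map_map, List.isEmpty_map, List.filter_map, Function.comp_def]
  simp

-- A's loop body for one position's hit list
def pvOutA (hits : List (Int × Int × Int × String × String)) :
    List (Int × Int × Int × String × String) :=
  let by_inst := hits.foldl (fun d h => d.modify (pvInst h) [] (fun x => x ++ [h]))
    PySem.Dict.empty
  let deduped := by_inst.items.foldl (fun acc ip =>
    if ip.2.length > 1 then acc ++ [PySem.List.maxD ip.2 pvRank pvDflt]
    else acc ++ [PySem.List.pyGetD ip.2 0 pvDflt]) []
  let cymbals := (deduped.filter (fun h => pvCYMBAL.contains (pvInst h))).map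
    (fun h => (h, pvCYMBAL.getD (pvInst h) (-1)))
  let sticks := (deduped.filter (fun h => pvSTICK.contains (pvInst h))).map
    (fun h => (h, pvSTICK.getD (pvInst h) (-1)))
  let feet := deduped.filter (fun h => pvInst h == "kick" || pvInst h == "hihat_pedal")
  (if cymbals.isEmpty then [] else
    [PySem.List.pyGetD ((cymbals.filter (fun x => x.2 == PySem.List.maxD
        (cymbals.map (fun x => x.2)) (fun p => p) 0)).map (fun x => x.1)) 0 pvDflt])
  ++ ((if sticks.isEmpty then [] else
    [PySem.List.pyGetD ((sticks.filter (fun x => x.2 == PySem.List.maxD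
        (sticks.map (fun x => x.2)) (fun p => p) 0)).map (fun x => x.1)) 0 pvDflt])
  ++ feet)

theorem pv_outA_eq (l : List (Int × Int × Int × String × String)) (p : Int × Int × Int) :
    pvOutA (pvGroup l p) = pvOutPos l p := by
  simp only [pvOutA]
  rw [pv_groupD_items pvInst (pvGroup l p), List.foldl_map]
  dsimp only
  rw [pv_foldl_append_if2
    (fun y => (List.filter (fun h => pvInst h == y) (pvGroup l p)).length > 1)
    (fun y => PySem.List.maxD (List.filter (fun h => pvInst h == y) (pvGroup l p)) pvRank pvDflt)
    (fun y => PySem.List.pyGetD (List.filter (fun h => pvInst h == y) (pvGroup l p)) 0 pvDflt),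
    List.nil_append]
  have hmap : (PySem.Set.ofList (List.map pvInst (pvGroup l p))).map
      (fun y => if (List.filter (fun h => pvInst h == y) (pvGroup l p)).length > 1
        then PySem.List.maxD (List.filter (fun h => pvInst h == y) (pvGroup l p)) pvRank pvDflt
        else PySem.List.pyGetD (List.filter (fun h => pvInst h == y) (pvGroup l p)) 0 pvDflt)
      = pvDeduped l p := by
    rw [pvDeduped, pvInsts]
    apply List.map_congr_left
    intro i hi
    have hne : List.filter (fun h => pvInst h == i) (pvGroup l p) ≠ [] := by
      rw [PySem.Set.mem_ofList] at hi
      rcases List.mem_map.1 hi with ⟨h0, hh0, rfl⟩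
      intro hnil
      have hmem : h0 ∈ List.filter (fun h => pvInst h == pvInst h0) (pvGroup l p) :=
        List.mem_filter.2 ⟨hh0, by simp⟩
      rw [hnil] at hmem
      exact List.not_mem_nil hmem
    have he := pv_entry_eq _ hne
    rw [pvBest, pvIHits]
    exact he
  rw [hmap, pv_pieceA, pv_pieceA, pvOutPos, List.append_assoc]

theorem pv_thmA (l : List (Int × Int × Int × String × String)) :
    resolve_layer_conflicts_py l
      = (PySem.Set.ofList (l.map pvPos)).flatMap (fun p => pvOutPos l p) := by
  have h1 : resolve_layer_conflicts_py l
      = (PySem.Set.ofList (l.map pvPos)).foldl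
          (fun acc p => acc ++ pvOutA (List.filter (fun h => pvPos h == p) l)) [] := by
    simp only [resolve_layer_conflicts_py]
    rw [pv_groupD_items pvPos l, List.foldl_map]
    dsimp only
    apply PySem.List.foldl_congr_mem
    intro acc p _
    simp only [pvOutA]
    split_ifs <;> simp [List.append_assoc]
  rw [h1, PySem.List.foldl_append_eq_flatMap, List.nil_append]
  have h2 : ∀ p, pvOutA (List.filter (fun h => pvPos h == p) l) = pvOutPos l p :=
    fun p => pv_outA_eq l p
  simp only [h2]

-- proof-side names for B's two tables and its emission loop (literal bodies from the port)
def pvTable (l : List (Int × Int × Int × String × String)) :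
    PySem.Dict ((Int × Int × Int) × String) (Int × Int × Int × String × String) :=
  l.foldl (fun t h =>
    t.insert (pvPos h, pvInst h) (match t.get? (pvPos h, pvInst h) with
      | none => h
      | some c => if pvRank h > pvRank c then h else c)) PySem.Dict.empty

def pvBestD (l : List (Int × Int × Int × String × String)) :
    PySem.Dict (Int × Int × Int)
      (Option (Int × Int × Int × String × String) × Option (Int × Int × Int × String × String)
        × List (Int × Int × Int × String × String)) :=
  (pvTable l).items.foldl (fun m pr =>
    let p := pr.1.1
    let inst := pr.1.2
    let hit := pr.2
    let st := m.getD p (none, none, ([] : List (Int × Int × Int × String × String)))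
    let cym := if pvCYMBAL.contains inst &&
        (st.1.elim true (fun c => decide (pvCYMBAL.getD (pvInst c) 0 < pvCYMBAL.getD inst 0)))
      then some hit else st.1
    let stick := if pvSTICK.contains inst &&
        (st.2.1.elim true (fun c => decide (pvSTICK.getD (pvInst c) 0 < pvSTICK.getD inst 0)))
      then some hit else st.2.1
    let feet := if inst == "kick" || inst == "hihat_pedal" then st.2.2 ++ [hit] else st.2.2
    m.insert p (cym, stick, feet)) PySem.Dict.empty

def pvStep
    (st : Option (Int × Int × Int × String × String) × Option (Int × Int × Int × String × String)
      × List (Int × Int × Int × String × String))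
    (pr : ((Int × Int × Int) × String) × (Int × Int × Int × String × String)) :
    Option (Int × Int × Int × String × String) × Option (Int × Int × Int × String × String)
      × List (Int × Int × Int × String × String) :=
  (if pvCYMBAL.contains pr.1.2 &&
      (st.1.elim true (fun c => decide (pvCYMBAL.getD (pvInst c) 0 < pvCYMBAL.getD pr.1.2 0)))
    then some pr.2 else st.1,
   if pvSTICK.contains pr.1.2 &&
      (st.2.1.elim true (fun c => decide (pvSTICK.getD (pvInst c) 0 < pvSTICK.getD pr.1.2 0)))
    then some pr.2 else st.2.1,
   if pr.1.2 == "kick" || pr.1.2 == "hihat_pedal" then st.2.2 ++ [pr.2] else st.2.2)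

def pvEmit
    (st : Option (Int × Int × Int × String × String) × Option (Int × Int × Int × String × String)
      × List (Int × Int × Int × String × String)) :
    List (Int × Int × Int × String × String) :=
  st.1.toList ++ (st.2.1.toList ++ st.2.2)

-- B is its emission loop over pvBestD (definitional)
theorem pv_altB (l : List (Int × Int × Int × String × String)) :
    resolve_layer_conflicts_py_alt l
      = (pvBestD l).values.foldl (fun out st =>
          (match st.2.1 with
           | some s => (match st.1 with | some c => out ++ [c] | none => out) ++ [s]
           | none => (match st.1 with | some c => out ++ [c] | none => out)) ++ st.2.2) [] := rfl

def pvKeyF (h : Int × Int × Int × String × String) : (Int × Int × Int) × String :=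
  (pvPos h, pvInst h)

def pvUpd (o : Option (Int × Int × Int × String × String))
    (h : Int × Int × Int × String × String) : Int × Int × Int × String × String :=
  match o with
  | none => h
  | some c => if pvRank h > pvRank c then h else c

theorem pv_foldl_upd_some (ys : List (Int × Int × Int × String × String))
    (a : Int × Int × Int × String × String) :
    ys.foldl (fun o h => some (pvUpd o h)) (some a)
      = some (ys.foldl (fun m x => if pvRank m < pvRank x then x else m) a) := by
  induction ys generalizing a with
  | nil => rfl
  | cons y ys ih =>
    simp only [List.foldl_cons]
    rw [show pvUpd (some a) y = if pvRank a < pvRank y then y else a from by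
      simp [pvUpd, gt_iff_lt]]
    by_cases hr : pvRank a < pvRank y <;> simp only [hr, if_pos, if_neg, ite_true, ite_false]
      <;> rw [ih]

-- per-key content of B's composite table
theorem pv_table_get? (l : List (Int × Int × Int × String × String))
    (k : (Int × Int × Int) × String) :
    (pvTable l).get? k
      = PySem.List.max? (l.filter (fun h => pvKeyF h == k)) pvRank := by
  have h1 : (pvTable l).get? k
      = (l.filter (fun h => pvKeyF h == k)).foldl (fun o h => some (pvUpd o h)) none :=
    pv_get?_foldl_insertUpd l pvKeyF pvUpd PySem.Dict.empty k
  rw [h1]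
  cases hx : l.filter (fun h => pvKeyF h == k) with
  | nil => rfl
  | cons y ys =>
    rw [List.foldl_cons, show some (pvUpd none y) = some y from rfl, pv_foldl_upd_some,
      pv_max?_cons]

theorem pv_ihits_ne_of_mem (l : List (Int × Int × Int × String × String))
    (k : (Int × Int × Int) × String) (hk : k ∈ PySem.Set.ofList (l.map pvKeyF)) :
    pvIHits l k.1 k.2 ≠ [] := by
  rw [PySem.Set.mem_ofList] at hk
  rcases List.mem_map.1 hk with ⟨h0, hh0, rfl⟩
  intro hnil
  have hmem : h0 ∈ pvIHits l (pvKeyF h0).1 (pvKeyF h0).2 := by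
    simp only [pvIHits, pvGroup, pvKeyF]
    exact List.mem_filter.2 ⟨List.mem_filter.2 ⟨hh0, by simp⟩, by simp⟩
  rw [hnil] at hmem
  exact List.not_mem_nil hmem

theorem pv_filter_keyF (l : List (Int × Int × Int × String × String))
    (k : (Int × Int × Int) × String) :
    l.filter (fun h => pvKeyF h == k) = pvIHits l k.1 k.2 := by
  rw [pvIHits, pvGroup, List.filter_filter]
  apply List.filter_congr
  intro h _
  cases k with
  | mk k1 k2 =>
    rw [show (pvKeyF h == (k1, k2)) = (pvPos h == k1 && pvInst h == k2) from rfl,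
      Bool.and_comm]

-- getD of a contained key does not depend on the default
theorem pv_getD_indep {κ ν : Type} [BEq κ] [LawfulBEq κ] (d : PySem.Dict κ ν) (k : κ)
    (hc : d.contains k = true) (a b : ν) : d.getD k a = d.getD k b := by
  rw [PySem.Dict.contains_eq_isSome_get?] at hc
  rcases Option.isSome_iff_exists.1 hc with ⟨v, hv⟩
  rw [PySem.Dict.getD_eq_get?_getD, PySem.Dict.getD_eq_get?_getD, hv]
  rfl

theorem pv_table_keys (l : List (Int × Int × Int × String × String)) :
    (pvTable l).keys = PySem.Set.ofList (l.map pvKeyF) := by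
  have h := PySem.Dict.keys_foldl_insert_key l pvKeyF
    (fun t h => pvUpd (t.get? (pvKeyF h)) h) PySem.Dict.empty
  rw [show (pvTable l).keys
      = (l.foldl (fun t h => t.insert (pvKeyF h) (pvUpd (t.get? (pvKeyF h)) h))
          PySem.Dict.empty).keys from rfl, h, PySem.Dict.keys_empty, PySem.Set.update_nil_left]

theorem pv_table_nodup (l : List (Int × Int × Int × String × String)) :
    (pvTable l).keys.Nodup := by
  rw [pv_table_keys]; exact PySem.Set.nodup_ofList _

theorem pv_table_items (l : List (Int × Int × Int × String × String)) :
    (pvTable l).items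
      = (PySem.Set.ofList (l.map pvKeyF)).map (fun k => (k, pvBest l k.1 k.2)) := by
  rw [PySem.Dict.items_eq_map_keys _ (pv_table_nodup l) pvDflt, pv_table_keys]
  apply List.map_congr_left
  intro k hk
  rw [PySem.Dict.getD_eq_get?_getD, pv_table_get?, pv_filter_keyF]
  have hne := pv_ihits_ne_of_mem l k hk
  cases hx : pvIHits l k.1 k.2 with
  | nil => exact absurd hx hne
  | cons y ys =>
    rw [pv_max?_cons]
    rw [pvBest, hx, pv_max?_cons]

-- the instrument of the per-(position,instrument) best hit is that instrument
theorem pv_inst_best (l : List (Int × Int × Int × String × String)) (p : Int × Int × Int)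
    (i : String) (hne : pvIHits l p i ≠ []) : pvInst (pvBest l p i) = i := by
  have hmem : pvBest l p i ∈ pvIHits l p i := by
    rw [pvBest]
    cases hx : pvIHits l p i with
    | nil => exact absurd hx hne
    | cons y ys =>
      have hsome : PySem.List.max? (y :: ys) pvRank
          = some (ys.foldl (fun m x => if pvRank m < pvRank x then x else m) y) :=
        pv_max?_cons pvRank y ys
      have hmem' := PySem.List.max?_mem hsome
      rw [hsome, Option.getD_some]
      exact hmem'
  have := (List.mem_filter.1 hmem).2
  simpa using this

theorem pv_bestD_getD (l : List (Int × Int × Int × String × String)) (p : Int × Int × Int) :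
    (pvBestD l).getD p (none, none, [])
      = ((pvTable l).items.filter (fun pr => pr.1.1 == p)).foldl pvStep (none, none, []) := by
  have h := pv_getD_foldl_insertUpd ((pvTable l).items) (fun pr => pr.1.1) pvStep
    ((none, none, []) : Option (Int × Int × Int × String × String)
      × Option (Int × Int × Int × String × String) × List (Int × Int × Int × String × String))
    PySem.Dict.empty p
  rw [PySem.Dict.getD_empty] at h
  exact h

theorem pv_bestD_keys (l : List (Int × Int × Int × String × String)) :
    (pvBestD l).keys = PySem.Set.ofList (l.map pvPos) := by
  have h := PySem.Dict.keys_foldl_insert_key ((pvTable l).items) (fun pr => pr.1.1)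
    (fun m pr => pvStep (m.getD pr.1.1 (none, none, [])) pr) PySem.Dict.empty
  rw [PySem.Dict.keys_empty, PySem.Set.update_nil_left] at h
  have h2 : (pvBestD l).keys = PySem.Set.ofList ((pvTable l).items.map (fun pr => pr.1.1)) := h
  rw [h2, pv_table_items, List.map_map]
  rw [show ((fun (pr : ((Int × Int × Int) × String) × (Int × Int × Int × String × String)) =>
      pr.1.1) ∘ (fun k => (k, pvBest l k.1 k.2)))
    = (fun (k : (Int × Int × Int) × String) => k.1) from rfl]
  rw [pv_ofList_map_ofList (fun k => k.1) (l.map pvKeyF), List.map_map]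
  rfl

theorem pv_bestD_nodup (l : List (Int × Int × Int × String × String)) :
    (pvBestD l).keys.Nodup := by
  rw [pv_bestD_keys]; exact PySem.Set.nodup_ofList _

-- bridge: the match-step fold from none IS max?
theorem pv_foldlstep_eq_max? {α : Type} (w : α → Int) (D : List α) :
    D.foldl (fun acc x => match acc with
      | none => some x
      | some m => if w m < w x then some x else some m) none = PySem.List.max? D w := by
  cases D with
  | nil => rfl
  | cons y ys =>
    rw [List.foldl_cons]
    rw [show (match (none : Option α) with
      | none => some y
      | some m => if w m < w y then some y else some m) = some y from rfl]
    rw [pv_max?_foldl_some, pv_max?_cons]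

theorem pv_ihits_ne_inst (l : List (Int × Int × Int × String × String)) (p : Int × Int × Int)
    (i : String)
    (hi : i ∈ PySem.Set.ofList ((l.filter (fun h => pvPos h == p)).map pvInst)) :
    pvIHits l p i ≠ [] := by
  rw [PySem.Set.mem_ofList] at hi
  rcases List.mem_map.1 hi with ⟨h0, hh0, rfl⟩
  intro hnil
  have hmem : h0 ∈ pvIHits l p (pvInst h0) := by
    simp only [pvIHits, pvGroup]
    exact List.mem_filter.2 ⟨hh0, by simp⟩
  rw [hnil] at hmem
  exact List.not_mem_nil hmem

-- the three independent accumulators of B's selection pass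
def pvSelC (c : Option (Int × Int × Int × String × String))
    (h : Int × Int × Int × String × String) : Option (Int × Int × Int × String × String) :=
  if pvCYMBAL.contains (pvInst h) &&
      (c.elim true (fun c' => decide (pvCYMBAL.getD (pvInst c') 0 < pvCYMBAL.getD (pvInst h) 0)))
    then some h else c

def pvSelS (s : Option (Int × Int × Int × String × String))
    (h : Int × Int × Int × String × String) : Option (Int × Int × Int × String × String) :=
  if pvSTICK.contains (pvInst h) &&
      (s.elim true (fun c' => decide (pvSTICK.getD (pvInst c') 0 < pvSTICK.getD (pvInst h) 0)))
    then some h else s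

def pvFoot (fs : List (Int × Int × Int × String × String))
    (h : Int × Int × Int × String × String) : List (Int × Int × Int × String × String) :=
  if pvInst h == "kick" || pvInst h == "hihat_pedal" then fs ++ [h] else fs

theorem pv_selC_fold (D : List (Int × Int × Int × String × String)) :
    D.foldl pvSelC none
      = PySem.List.max? (D.filter (fun h => pvCYMBAL.contains (pvInst h)))
          (fun h => pvCYMBAL.getD (pvInst h) 0) := by
  have h1 := pv_selFold (fun h => pvCYMBAL.contains (pvInst h))
    (fun h => pvCYMBAL.getD (pvInst h) 0) D none
  have h2 := pv_foldlstep_eq_max? (fun h => pvCYMBAL.getD (pvInst h) 0)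
    (D.filter (fun h => pvCYMBAL.contains (pvInst h)))
  exact h1.trans h2

theorem pv_selS_fold (D : List (Int × Int × Int × String × String)) :
    D.foldl pvSelS none
      = PySem.List.max? (D.filter (fun h => pvSTICK.contains (pvInst h)))
          (fun h => pvSTICK.getD (pvInst h) 0) := by
  have h1 := pv_selFold (fun h => pvSTICK.contains (pvInst h))
    (fun h => pvSTICK.getD (pvInst h) 0) D none
  have h2 := pv_foldlstep_eq_max? (fun h => pvSTICK.getD (pvInst h) 0)
    (D.filter (fun h => pvSTICK.contains (pvInst h)))
  exact h1.trans h2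

theorem pv_foot_fold (D : List (Int × Int × Int × String × String)) :
    D.foldl pvFoot []
      = D.filter (fun h => pvInst h == "kick" || pvInst h == "hihat_pedal") := by
  have h := PySem.List.foldl_append_if_eq_filter
    (fun h => pvInst h == "kick" || pvInst h == "hihat_pedal") D ([] : List _)
  rw [List.nil_append] at h
  exact h

theorem pv_outB_pos (l : List (Int × Int × Int × String × String)) (p : Int × Int × Int) :
    pvEmit (((pvTable l).items.filter (fun pr => pr.1.1 == p)).foldl pvStep (none, none, []))
      = pvOutPos l p := by
  rw [pv_table_items, List.filter_map]
  rw [show ((fun (pr : ((Int × Int × Int) × String) × (Int × Int × Int × String × String)) =>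
      pr.1.1 == p) ∘ (fun k => (k, pvBest l k.1 k.2)))
    = (fun (k : (Int × Int × Int) × String) => k.1 == p) from rfl]
  rw [pv_filter_ofList (fun (k : (Int × Int × Int) × String) => k.1 == p) (l.map pvKeyF),
    List.filter_map]
  rw [show ((fun (k : (Int × Int × Int) × String) => k.1 == p) ∘ pvKeyF)
    = (fun h => pvPos h == p) from rfl]
  have hcg : (l.filter (fun h => pvPos h == p)).map pvKeyF
      = ((l.filter (fun h => pvPos h == p)).map pvInst).map (Prod.mk p) := by
    rw [List.map_map]
    apply List.map_congr_left
    intro h hh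
    have hp : pvPos h = p := by simpa using (List.mem_filter.1 hh).2
    simp only [pvKeyF, Function.comp_def, hp]
  rw [hcg, pv_ofList_map_inj (Prod.mk p)
    (fun a b hab => by simpa using congrArg Prod.snd hab), List.map_map]
  have hcg2 : (PySem.Set.ofList ((l.filter (fun h => pvPos h == p)).map pvInst)).map
      ((fun (k : (Int × Int × Int) × String) => (k, pvBest l k.1 k.2)) ∘ Prod.mk p)
      = (pvDeduped l p).map (fun h => ((p, pvInst h), h)) := by
    rw [pvDeduped, List.map_map]
    apply List.map_congr_left
    intro i hi
    have hne := pv_ihits_ne_inst l p i hi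
    simp only [Function.comp_def]
    rw [pv_inst_best l p i hne]
  rw [hcg2, List.foldl_map]
  rw [show (fun (st : Option (Int × Int × Int × String × String)
        × Option (Int × Int × Int × String × String)
        × List (Int × Int × Int × String × String)) h =>
      pvStep st ((p, pvInst h), h))
    = (fun st h => (pvSelC st.1 h,
        (fun (sf : Option (Int × Int × Int × String × String)
            × List (Int × Int × Int × String × String)) h =>
          (pvSelS sf.1 h, pvFoot sf.2 h)) st.2 h)) from rfl]
  rw [PySem.List.foldl_prod_mk (f := pvSelC)
    (g := fun (sf : Option (Int × Int × Int × String × String)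
        × List (Int × Int × Int × String × String)) h =>
      (pvSelS sf.1 h, pvFoot sf.2 h))]
  rw [PySem.List.foldl_prod_mk (f := pvSelS) (g := pvFoot)]
  rw [pv_selC_fold, pv_selS_fold, pv_foot_fold]
  rw [pv_max?_congr (fun h => pvCYMBAL.getD (pvInst h) 0)
      (fun h => pvCYMBAL.getD (pvInst h) (-1)) _
      (fun x hx => pv_getD_indep pvCYMBAL (pvInst x) (List.mem_filter.1 hx).2 0 (-1)),
    pv_max?_congr (fun h => pvSTICK.getD (pvInst h) 0)
      (fun h => pvSTICK.getD (pvInst h) (-1)) _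
      (fun x hx => pv_getD_indep pvSTICK (pvInst x) (List.mem_filter.1 hx).2 0 (-1))]
  rw [pvEmit, pvOutPos, List.append_assoc]

theorem pv_thmB (l : List (Int × Int × Int × String × String)) :
    resolve_layer_conflicts_py_alt l
      = (PySem.Set.ofList (l.map pvPos)).flatMap (fun p => pvOutPos l p) := by
  rw [pv_altB]
  have h1 : (pvBestD l).values.foldl (fun out st =>
      (match st.2.1 with
       | some s => (match st.1 with | some c => out ++ [c] | none => out) ++ [s]
       | none => (match st.1 with | some c => out ++ [c] | none => out)) ++ st.2.2) []
      = (pvBestD l).values.foldl (fun out st => out ++ pvEmit st) [] := by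
    apply PySem.List.foldl_congr_mem
    intro acc st _
    rcases st with ⟨c, s, f⟩
    cases c <;> cases s <;> simp [pvEmit, List.append_assoc]
  rw [h1, PySem.List.foldl_append_eq_flatMap, List.nil_append]
  have h2 : (pvBestD l).values = (pvBestD l).items.map (fun pr => pr.2) := rfl
  rw [h2, List.flatMap_map]
  rw [PySem.Dict.items_eq_map_keys _ (pv_bestD_nodup l)
    ((none, none, []) : Option (Int × Int × Int × String × String)
      × Option (Int × Int × Int × String × String)
      × List (Int × Int × Int × String × String))]
  rw [pv_bestD_keys, List.flatMap_map]
  have h3 : ∀ p : Int × Int × Int,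
      pvEmit ((pvBestD l).getD p (none, none, [])) = pvOutPos l p := fun p => by
    rw [pv_bestD_getD, pv_outB_pos]
  simp only [h3]

-- ===== VERDICT (by name: the statement is the Claim_ definition above) =====
theorem resolve_layer_conflicts_py_spec : Claim_equal_resolve_layer_conflicts_py := by
  intro merged_hits _
  show resolve_layer_conflicts_py merged_hits = resolve_layer_conflicts_py_alt merged_hits
  rw [pv_thmA, pv_thmB]
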